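-- pv_equiv track=rewrite | github.com/UdhayaShan1/CodeForces | 710A - King Moves.py | check
-- ===== SOURCE A (Python) =====
-- def check(i,j):
--     count = 0
--     for k in range(i-1,i+2):
--         for z in range(j-1,j+2):
--             if k < 0 or z < 0 or k >= 8 or z >= 8:
--                 continue
--             else:
--                 count+=1
--     count-=1
--     return count
-- ===== SOURCE B (Python) =====
-- def check(i, j):
--     rows = max(0, min(i + 1, 7) - max(i - 1, 0) + 1)
--     cols = max(0, min(j + 1, 7) - max(j - 1, 0) + 1)
--     return rows * cols - 1
-- ===== Notes on version B (the rewrite author's own statement) =====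
-- stated objective: simpler
-- what changed: Replaced the 3x3 double loop with a closed-form product: count the valid row offsets and column offsets by clamping [i-1,i+1] and [j-1,j+1] to [0,7] and return rows*cols - 1.
import Mathlib
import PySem

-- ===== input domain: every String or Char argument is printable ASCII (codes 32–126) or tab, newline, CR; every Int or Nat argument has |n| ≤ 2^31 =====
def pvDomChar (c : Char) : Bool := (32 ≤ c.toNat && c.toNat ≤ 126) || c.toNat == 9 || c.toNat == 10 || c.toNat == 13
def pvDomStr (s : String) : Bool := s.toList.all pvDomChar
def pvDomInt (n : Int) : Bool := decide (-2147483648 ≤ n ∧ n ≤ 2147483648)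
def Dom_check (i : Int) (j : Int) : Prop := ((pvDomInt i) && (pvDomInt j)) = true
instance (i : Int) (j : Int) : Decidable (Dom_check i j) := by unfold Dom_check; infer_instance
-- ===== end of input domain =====

-- B replaces A's 3x3 double loop by a closed-form product of clamped interval lengths (objective: simpler).

-- ===== PORT A =====
def check (i : Int) (j : Int) : Int :=
  let count : Int :=
    (PySem.List.pyRange (i-1) (i+2) 1).foldl (fun c k =>
      (PySem.List.pyRange (j-1) (j+2) 1).foldl (fun c z =>
        if k < 0 ∨ z < 0 ∨ k ≥ 8 ∨ z ≥ 8 then c else c + 1) c) 0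
  count - 1

-- ===== PORT B =====
def check_alt (i : Int) (j : Int) : Int :=
  let rows : Int := max 0 (min (i + 1) 7 - max (i - 1) 0 + 1)
  let cols : Int := max 0 (min (j + 1) 7 - max (j - 1) 0 + 1)
  rows * cols - 1

-- ===== PRECONDITION & SPEC =====
def Spec_check (i : Int) (j : Int) (out : Int) : Prop := out = check_alt i j
instance (i : Int) (j : Int) (out : Int) : Decidable (Spec_check i j out) := by unfold Spec_check; infer_instance

-- ===== CLAIM (what is proved, stated in full; the proofs are below) =====
def Claim_equal_check : Prop := ∀ (i : Int) (j : Int), Dom_check i j → Spec_check i j (check i j)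

-- ===== LEMMAS AND PROOFS =====
theorem pyRange_three (a : Int) : PySem.List.pyRange a (a+3) 1 = [a, a+1, a+2] := by
  have h : ((a+3) - a).toNat = 3 := by omega
  rw [PySem.List.pyRange_one, h]
  simp [List.range_succ]

theorem check_eq (i j : Int) : check i j = check_alt i j := by
  have hi : i + 2 = (i - 1) + 3 := by ring
  have hj : j + 2 = (j - 1) + 3 := by ring
  unfold check check_alt
  rw [hi, hj, pyRange_three, pyRange_three]
  have h1 : i - 1 + 1 = i := by ring
  have h2 : i - 1 + 2 = i + 1 := by ring
  have h3 : j - 1 + 1 = j := by ring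
  have h4 : j - 1 + 2 = j + 1 := by ring
  rw [h1, h2, h3, h4]
  have hinner : ∀ (c k : Int),
      ([j - 1, j, j + 1].foldl (fun c z =>
        if k < 0 ∨ z < 0 ∨ k ≥ 8 ∨ z ≥ 8 then c else c + 1) c)
      = c + (if 0 ≤ k ∧ k < 8 then max 0 (min (j + 1) 7 - max (j - 1) 0 + 1) else 0) := by
    intro c k
    simp only [List.foldl]
    split_ifs <;> omega
  rw [List.foldl_cons, List.foldl_cons, List.foldl_cons, List.foldl_nil]
  simp only [hinner]
  have hrows : max 0 (min (i + 1) 7 - max (i - 1) 0 + 1)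
      = (if 0 ≤ i - 1 ∧ i - 1 < 8 then (1:Int) else 0)
        + (if 0 ≤ i ∧ i < 8 then (1:Int) else 0)
        + (if 0 ≤ i + 1 ∧ i + 1 < 8 then (1:Int) else 0) := by
    split_ifs <;> omega
  rw [hrows]
  split_ifs <;> ring

-- ===== VERDICT (by name: the statement is the Claim_ definition above) =====
theorem check_spec : Claim_equal_check := by
  intro i j _
  exact check_eq i j
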